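/- GENERATED by c/gen_decode.py: decode facts of the image, one per distinct instruction byte string. -/
import UserX.DecodeImage

#decode_all Toy.Dec
  "0fb635dcc30300"  -- movzx esi,BYTE PTR [rip+0x3c3dc]
  "4881c488000000"  -- add rsp,0x88
  "488b0584cb0300"  -- mov rax,QWORD PTR [rip+0x3cb84]
  "498dbc2400121400"  -- lea rdi,[r12+0x141200]
  "7ed9"  -- jle 105335
  "ba40000000"  -- mov edx,0x40
  "e85e030000"  -- call 105400
  "e8f7c0ffff"  -- call 101520
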